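-- pv_equiv track=rewrite | github.com/Yael-Weiss/FinalProject | triangles_funcs.py | is_loc_in_lower_right_tri
-- ===== SOURCE A (Python) =====
-- from typing import List, Tuple
--
-- Coordinates = Tuple[int, int]
--
-- def is_loc_in_lower_right_tri(loc: Coordinates) -> bool:
--     start_col = 21
--     places_to_fill = 1
--     start_row = 9
--     while (start_row != 13):
--         for i in range(places_to_fill):
--             if (start_row == loc[0] and (start_col+2*i) == loc[1]):
--                 return True
--         start_col -= 1
--         start_row += 1
--         places_to_fill += 1
--     return False
-- ===== SOURCE B (Python) =====
-- def is_loc_in_lower_right_tri(loc):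
--     r, c = loc[0], loc[1]
--     return 9 <= r <= 12 and 30 - r <= c <= r + 12 and (c - r) % 2 == 0
-- ===== Notes on version B (the rewrite author's own statement) =====
-- stated objective: simpler
-- what changed: Replaced the row-sweeping while/for loop over the four triangle rows with a direct closed-form membership test (row bounds, column bounds 30-r..r+12, and equal parity of row and column).
import Mathlib
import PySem

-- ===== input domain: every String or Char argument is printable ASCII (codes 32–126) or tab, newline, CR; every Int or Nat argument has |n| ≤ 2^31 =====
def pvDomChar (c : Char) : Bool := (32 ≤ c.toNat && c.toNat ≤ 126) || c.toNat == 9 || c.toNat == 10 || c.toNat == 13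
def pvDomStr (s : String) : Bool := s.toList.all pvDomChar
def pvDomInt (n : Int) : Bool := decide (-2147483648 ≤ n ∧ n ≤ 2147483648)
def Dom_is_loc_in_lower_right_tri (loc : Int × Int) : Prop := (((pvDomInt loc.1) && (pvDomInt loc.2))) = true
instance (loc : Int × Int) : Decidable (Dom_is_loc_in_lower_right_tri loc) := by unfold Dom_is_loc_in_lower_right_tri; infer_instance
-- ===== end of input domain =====

-- B replaces A's row-sweeping loop with a closed-form bounds-and-parity membership test (objective: simpler).


-- ===== PORT A =====
-- inner 'for i in range(places_to_fill)' with early 'return True' = any over the range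
def triInner (loc : Int × Int) (start_col start_row places_to_fill : Int) : Bool :=
  (PySem.List.pyRange 0 places_to_fill 1).any
    (fun i => start_row == loc.1 && (start_col + 2 * i) == loc.2)

-- the while loop; fuel bounds the iterations (4 suffice: start_row goes 9,10,11,12,13)
def triLoop (loc : Int × Int) (start_col start_row places_to_fill : Int) : Nat → Bool
  | 0 => false
  | fuel + 1 =>
    if start_row = 13 then false
    else if triInner loc start_col start_row places_to_fill then true
    else triLoop loc (start_col - 1) (start_row + 1) (places_to_fill + 1) fuel

def is_loc_in_lower_right_tri (loc : Int × Int) : Bool :=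
  triLoop loc 21 9 1 5

-- ===== PORT B =====
def is_loc_in_lower_right_tri_alt (loc : Int × Int) : Bool :=
  let r := loc.1
  let c := loc.2
  decide (9 ≤ r) && decide (r ≤ 12) && decide (30 - r ≤ c) && decide (c ≤ r + 12)
    && (PySem.Int.mod (c - r) 2 == 0)

-- ===== PRECONDITION & SPEC =====
def Spec_is_loc_in_lower_right_tri (loc : Int × Int) (out : Bool) : Prop := out = is_loc_in_lower_right_tri_alt loc
instance (loc : Int × Int) (out : Bool) : Decidable (Spec_is_loc_in_lower_right_tri loc out) := by unfold Spec_is_loc_in_lower_right_tri; infer_instance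

-- ===== CLAIM (what is proved, stated in full; the proofs are below) =====
def Claim_equal_is_loc_in_lower_right_tri : Prop := ∀ (loc : Int × Int), Dom_is_loc_in_lower_right_tri loc → Spec_is_loc_in_lower_right_tri loc (is_loc_in_lower_right_tri loc)

-- ===== LEMMAS AND PROOFS =====

-- ===== VERDICT (by name: the statement is the Claim_ definition above) =====
theorem is_loc_in_lower_right_tri_spec : Claim_equal_is_loc_in_lower_right_tri := by
  intro loc _
  obtain ⟨r, c⟩ := loc
  unfold Spec_is_loc_in_lower_right_tri
  rw [Bool.eq_iff_iff]
  simp [is_loc_in_lower_right_tri, is_loc_in_lower_right_tri_alt, triLoop, triInner,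
    PySem.List.pyRange]
  constructor
  · rintro (⟨hr, hc⟩ | ⟨x, hx, hr, hc⟩ | ⟨x, hx, hr, hc⟩ | ⟨x, hx, hr, hc⟩) <;> omega
  · rintro ⟨⟨⟨⟨h1, h2⟩, h3⟩, h4⟩, k, hk⟩
    have hr : r = 9 ∨ r = 10 ∨ r = 11 ∨ r = 12 := by omega
    rcases hr with h | h | h | h
    · exact Or.inl ⟨by omega, by omega⟩
    · exact Or.inr (Or.inl ⟨((c - 20) / 2).toNat, by omega, by omega, by omega⟩)
    · exact Or.inr (Or.inr (Or.inl ⟨((c - 19) / 2).toNat, by omega, by omega, by omega⟩))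
    · exact Or.inr (Or.inr (Or.inr ⟨((c - 18) / 2).toNat, by omega, by omega, by omega⟩))
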